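-- pv_equiv track=rewrite | github.com/stumpc5/chess960 | Code/analyze_openings.py | AlgebraicNotation
-- ===== SOURCE A (Python) =====
-- def AlgebraicNotation(opening):
--     result = ""
--     for idx, move in enumerate(opening):
--         if idx % 2 == 0:
--             result += f" {1 + idx//2}.{move}"
--         else:
--             result += f" {move}"
--     return result
-- ===== SOURCE B (Python) =====
-- def AlgebraicNotation(opening):
--     def go(num, moves):
--         if not moves:
--             return []
--         if len(moves) == 1:
--             return [f" {num}.{moves[0]}"]
--         return [f" {num}.{moves[0]}", f" {moves[1]}"] + go(num + 1, moves[2:])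
--     return "".join(go(1, opening))
-- ===== Notes on version B (the rewrite author's own statement) =====
-- stated objective: alternative
-- what changed: Replaces the single-move loop with an index-parity test by a recursive pair-wise decomposition: each recursion step consumes one full move (a white move plus an optional black move), carrying the move number directly, and the pieces are joined at the end.
import Mathlib
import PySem

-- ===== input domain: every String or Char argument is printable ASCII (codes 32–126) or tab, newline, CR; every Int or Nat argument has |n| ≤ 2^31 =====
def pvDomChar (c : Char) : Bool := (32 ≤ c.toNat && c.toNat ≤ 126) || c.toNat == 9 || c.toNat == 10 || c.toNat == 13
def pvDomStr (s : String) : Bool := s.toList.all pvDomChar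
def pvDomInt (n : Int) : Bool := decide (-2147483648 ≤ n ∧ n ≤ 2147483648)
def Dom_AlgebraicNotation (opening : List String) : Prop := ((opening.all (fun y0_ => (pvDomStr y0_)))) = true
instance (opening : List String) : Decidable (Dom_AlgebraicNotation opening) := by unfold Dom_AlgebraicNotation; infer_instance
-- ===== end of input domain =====

-- B replaces A's per-move loop with parity test by a recursive pair-wise (full-move) decomposition joined at the end; same output, alternative structure.


-- ===== PORT A =====
def AlgebraicNotation (opening : List String) : String :=
  (PySem.List.enumerate opening).foldl
    (fun result p =>
      if PySem.Int.mod p.1 2 = 0 then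
        result ++ (" " ++ PySem.Int.toStr (1 + PySem.Int.floordiv p.1 2) ++ "." ++ p.2)
      else
        result ++ (" " ++ p.2))
    ""

-- ===== PORT B =====
def algNotGo (num : Int) (moves : List String) : List String :=
  match moves with
  | [] => []
  | [w] => [" " ++ PySem.Int.toStr num ++ "." ++ w]
  | w :: b :: rest => (" " ++ PySem.Int.toStr num ++ "." ++ w) :: (" " ++ b) :: algNotGo (num + 1) rest

def AlgebraicNotation_alt (opening : List String) : String :=
  String.join (algNotGo 1 opening)

-- ===== PRECONDITION & SPEC =====
def Spec_AlgebraicNotation (opening : List String) (out : String) : Prop := out = AlgebraicNotation_alt opening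
instance (opening : List String) (out : String) : Decidable (Spec_AlgebraicNotation opening out) := by unfold Spec_AlgebraicNotation; infer_instance

-- ===== CLAIM (what is proved, stated in full; the proofs are below) =====
def Claim_equal_AlgebraicNotation : Prop := ∀ (opening : List String), Dom_AlgebraicNotation opening → Spec_AlgebraicNotation opening (AlgebraicNotation opening)

-- ===== LEMMAS AND PROOFS =====
theorem algNot_joinAux (l : List String) : ∀ (a : String),
    l.foldl (fun r s => r ++ s) a = a ++ l.foldl (fun r s => r ++ s) "" := by
  induction l with
  | nil => simp
  | cons x xs ih => 
    intro a
    simp only [List.foldl_cons]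
    rw [ih (a ++ x), ih ("" ++ x)]
    simp [String.append_assoc]

theorem algNot_main (num : Int) (moves : List String) : ∀ (acc : String),
    (PySem.List.enumerate moves (2 * (num - 1))).foldl
      (fun result p =>
        if PySem.Int.mod p.1 2 = 0 then
          result ++ (" " ++ PySem.Int.toStr (1 + PySem.Int.floordiv p.1 2) ++ "." ++ p.2)
        else
          result ++ (" " ++ p.2))
      acc = acc ++ String.join (algNotGo num moves) := by
  induction num, moves using algNotGo.induct with
  | case1 num => simp [algNotGo, PySem.List.enumerate, String.join]
  | case2 num w =>
    intro acc
    have hm : PySem.Int.mod (2 * (num - 1)) 2 = 0 := by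
      rw [PySem.Int.mod_eq_emod_of_pos (by omega : (0:Int) < 2)]; omega
    have hd : PySem.Int.floordiv (2 * (num - 1)) 2 = num - 1 := by
      rw [PySem.Int.floordiv_eq_ediv_of_pos (by omega : (0:Int) < 2)]; omega
    simp [algNotGo, PySem.List.enumerate, String.join]
  | case3 num w b rest ih =>
    intro acc
    have hm : PySem.Int.mod (2 * (num - 1)) 2 = 0 := by
      rw [PySem.Int.mod_eq_emod_of_pos (by omega : (0:Int) < 2)]; omega
    have hm1 : PySem.Int.mod (2 * (num - 1) + 1) 2 = 1 := by
      rw [PySem.Int.mod_eq_emod_of_pos (by omega : (0:Int) < 2)]; omega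
    have hd : PySem.Int.floordiv (2 * (num - 1)) 2 = num - 1 := by
      rw [PySem.Int.floordiv_eq_ediv_of_pos (by omega : (0:Int) < 2)]; omega
    have h2 : 2 * (num - 1) + 1 + 1 = 2 * (num + 1 - 1) := by ring
    simp only [PySem.List.enumerate_cons, List.foldl_cons, hm, hm1, hd, if_pos, if_neg,
      one_ne_zero, not_false_iff, h2]
    rw [ih]
    have hn : 1 + (num - 1) = num := by omega
    simp only [algNotGo, String.join, hn]
    simp only [List.foldl_cons]
    rw [algNot_joinAux (algNotGo (num + 1) rest)
      ("" ++ (" " ++ PySem.Int.toStr num ++ "." ++ w) ++ (" " ++ b))]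
    simp [String.append_assoc]

-- ===== VERDICT (by name: the statement is the Claim_ definition above) =====
theorem AlgebraicNotation_spec : Claim_equal_AlgebraicNotation := by
  intro opening _
  unfold Spec_AlgebraicNotation AlgebraicNotation AlgebraicNotation_alt
  have h := algNot_main 1 opening
  simpa using h ""
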